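-- pv_equiv track=rewrite | github.com/QBAgit/PYT_PRZYKLADOWE | answers.py | upFirstChar
-- ===== SOURCE A (Python) =====
-- def upFirstChar(word):
--     out = ""
--     for i in range(0,len(word)):
--         if i==0:
--             mychar = word[0].upper()
--         else:
--             mychar = word[i].lower()
--         out+=mychar
--     return out
-- ===== SOURCE B (Python) =====
-- def upFirstChar(word):
--     return word[:1].upper() + word[1:].lower()
-- ===== Notes on version B (the rewrite author's own statement) =====
-- stated objective: idiomatic
-- what changed: Replaces the index-by-index loop with per-character branching and string concatenation by two whole-string slice operations: upper on word[:1] concatenated with lower on word[1:].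
import Mathlib
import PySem

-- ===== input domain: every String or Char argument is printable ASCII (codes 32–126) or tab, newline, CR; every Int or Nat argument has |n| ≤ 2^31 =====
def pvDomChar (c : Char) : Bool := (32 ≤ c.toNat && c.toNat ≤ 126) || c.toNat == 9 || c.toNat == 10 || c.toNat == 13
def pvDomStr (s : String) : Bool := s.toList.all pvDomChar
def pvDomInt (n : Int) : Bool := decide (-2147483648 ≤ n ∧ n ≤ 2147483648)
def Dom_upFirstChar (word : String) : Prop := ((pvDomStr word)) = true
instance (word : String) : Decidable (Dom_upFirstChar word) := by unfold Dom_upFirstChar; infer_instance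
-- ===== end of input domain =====

-- B replaces A's per-index loop (branching on i == 0) by two whole-string slice operations: word[:1].upper() + word[1:].lower() (idiomatic).

-- ===== PORT A =====
-- A: out = ""; for i in range(0, len(word)): out += word[0].upper() if i == 0 else word[i].lower()
def upFirstChar (word : String) : String :=
  String.ofList ((PySem.List.pyRange 0 (PySem.List.len word.toList) 1).foldl
    (fun out i =>
      let mychar := if i = 0 then PySem.Chars.upper [PySem.List.pyGetD word.toList 0 ' ']
                    else PySem.Chars.lower [PySem.List.pyGetD word.toList i ' ']
      out ++ mychar) [])

-- ===== PORT B =====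
-- B: word[:1].upper() + word[1:].lower()
def upFirstChar_alt (word : String) : String :=
  String.ofList (PySem.Chars.upper (PySem.List.slice word.toList none (some 1)) ++
                 PySem.Chars.lower (PySem.List.slice word.toList (some 1) none))

-- ===== PRECONDITION & SPEC =====
def Spec_upFirstChar (word : String) (out : String) : Prop := out = upFirstChar_alt word
instance (word : String) (out : String) : Decidable (Spec_upFirstChar word out) := by unfold Spec_upFirstChar; infer_instance

-- ===== CLAIM (what is proved, stated in full; the proofs are below) =====
def Claim_equal_upFirstChar : Prop := ∀ (word : String), Dom_upFirstChar word → Spec_upFirstChar word (upFirstChar word)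

-- ===== LEMMAS AND PROOFS =====

-- A's loop over a char list equals B's slice expression, on the list side.
theorem upFirstChar_lists (l : List Char) :
    (PySem.List.pyRange 0 (PySem.List.len l) 1).foldl
      (fun out i =>
        let mychar := if i = 0 then PySem.Chars.upper [PySem.List.pyGetD l 0 ' ']
                      else PySem.Chars.lower [PySem.List.pyGetD l i ' ']
        out ++ mychar) []
    = PySem.Chars.upper (PySem.List.slice l none (some 1)) ++
      PySem.Chars.lower (PySem.List.slice l (some 1) none) := by
  cases l with
  | nil => rfl
  | cons c cs =>
    rw [PySem.List.pyRange_one_cons (by simp [PySem.List.len]; try omega)]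
    simp only [List.foldl_cons, List.nil_append, if_true]
    norm_num
    rw [List.map_congr_left (g := fun i => [PySem.Chars.lowerChar (PySem.List.pyGetD (c :: cs) i ' ')])
        (by intro i hi
            have h := (PySem.List.mem_pyRange_one).1 hi
            rw [if_neg (by omega : ¬ i = 0)]
            rfl)]
    rw [← List.flatMap_def]
    have hfm : ∀ (L : List Int) (f : Int → Char), L.flatMap (fun i => [f i]) = L.map f := by
      intro L f; induction L with
      | nil => rfl
      | cons a t ih => simp [ih]
    rw [hfm]
    have hlen : ((cs.length : Int) + 1) = PySem.List.len (c :: cs) := by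
      simp [PySem.List.len]
    rw [hlen]
    have : (PySem.List.pyRange 1 (PySem.List.len (c :: cs))).map
            (fun i => PySem.Chars.lowerChar (PySem.List.pyGetD (c :: cs) i ' '))
         = ((PySem.List.pyRange 1 (PySem.List.len (c :: cs))).map
            (fun i => PySem.List.pyGetD (c :: cs) i ' ')).map PySem.Chars.lowerChar := by
      rw [List.map_map]; rfl
    rw [this, PySem.List.map_pyGetD_pyRange (c :: cs) ' ' (by norm_num)]
    have hs1 : PySem.List.slice (c :: cs) none (some 1) = [c] := by
      rw [PySem.List.slice_to (c :: cs) (b := 1) (by norm_num)]; rfl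
    have hs2 : PySem.List.slice (c :: cs) (some 1) none = cs := by
      rw [PySem.List.slice_from (c :: cs) (a := 1) (by norm_num)]; rfl
    rw [hs1, hs2]
    rfl

-- ===== VERDICT (by name: the statement is the Claim_ definition above) =====
theorem upFirstChar_spec : Claim_equal_upFirstChar := by
  intro word _
  unfold Spec_upFirstChar upFirstChar upFirstChar_alt
  rw [upFirstChar_lists]
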